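-- pv_equiv track=rewrite | github.com/sriramakh/ppt-master | src/pptmaster/builder/slides/s40_risk_matrix.py | _assign_grid_positions
-- ===== SOURCE A (Python) =====
-- _SEVERITY_GRID_POS = {
--     "low":      (2, 0),   # low impact, low likelihood
--     "medium":   (1, 1),   # medium impact, medium likelihood
--     "high":     (0, 2),   # high impact, high likelihood
--     "critical": (0, 2),   # top-right danger zone (shares with high, offset)
-- }
--
-- def _assign_grid_positions(items):
--     """Assign each risk item to a 3x3 grid position, spreading duplicates.
--
--     Returns list of (name, severity, description, row, col).
--     """
--     # Track occupied cells to offset duplicates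
--     used = {}
--     result = []
--     for name, severity, desc in items:
--         base_row, base_col = _SEVERITY_GRID_POS.get(severity, (1, 1))
--         key = (base_row, base_col)
--         count = used.get(key, 0)
--         # Nudge duplicates to adjacent cells
--         row, col = base_row, base_col
--         if count == 1:
--             col = min(base_col + 1, 2)
--             if (row, col) == (base_row, base_col):
--                 row = min(base_row + 1, 2)
--         elif count == 2:
--             row = min(base_row + 1, 2)
--         elif count >= 3:
--             row = max(base_row - 1, 0)
--             col = max(base_col - 1, 0)
--         used[key] = count + 1
--         result.append((name, severity, desc, row, col))
--     return result
-- ===== SOURCE B (Python) =====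
-- _SEVERITY_GRID_POS = {
--     "low":      (2, 0),
--     "medium":   (1, 1),
--     "high":     (0, 2),
--     "critical": (0, 2),
-- }
--
--
-- def _place(base, count):
--     base_row, base_col = base
--     row, col = base_row, base_col
--     if count == 1:
--         col = min(base_col + 1, 2)
--         if (row, col) == (base_row, base_col):
--             row = min(base_row + 1, 2)
--     elif count == 2:
--         row = min(base_row + 1, 2)
--     elif count >= 3:
--         row = max(base_row - 1, 0)
--         col = max(base_col - 1, 0)
--     return row, col
--
--
-- def _assign_grid_positions(items):
--     """Group items by base cell first, then place each group's members
--     by their rank within the group; output order matches input order."""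
--     groups = {}
--     for idx, (_name, severity, _desc) in enumerate(items):
--         base = _SEVERITY_GRID_POS.get(severity, (1, 1))
--         groups.setdefault(base, []).append(idx)
--     placement = {}
--     for base, idxs in groups.items():
--         for count, idx in enumerate(idxs):
--             placement[idx] = _place(base, count)
--     return [(name, severity, desc, *placement[i])
--             for i, (name, severity, desc) in enumerate(items)]
-- ===== Notes on version B (the rewrite author's own statement) =====
-- stated objective: alternative
-- what changed: A makes one pass with a running per-cell counter dict; B first builds a base-cell -> list-of-original-indices index, then places each group's members by their rank within the group and scatters the placements back into input order.
import Mathlib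
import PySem

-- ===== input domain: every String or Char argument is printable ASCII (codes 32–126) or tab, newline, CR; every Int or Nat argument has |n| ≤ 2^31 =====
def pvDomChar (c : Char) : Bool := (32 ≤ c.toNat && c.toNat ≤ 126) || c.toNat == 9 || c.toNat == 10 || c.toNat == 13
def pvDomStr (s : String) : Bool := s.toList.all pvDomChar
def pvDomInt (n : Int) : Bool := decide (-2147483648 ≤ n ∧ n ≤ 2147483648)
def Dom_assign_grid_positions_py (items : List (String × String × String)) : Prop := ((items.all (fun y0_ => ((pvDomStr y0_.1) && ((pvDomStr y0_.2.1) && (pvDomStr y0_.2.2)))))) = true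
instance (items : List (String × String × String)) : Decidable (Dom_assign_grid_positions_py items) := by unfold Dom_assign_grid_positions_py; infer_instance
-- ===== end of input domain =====

-- B re-implements A by a different decomposition: it first groups the item indices by base
-- cell, then places each group's members by rank and scatters the results back into input
-- order (same values, same order as A's single running-counter pass); not claimed faster.

-- shared module constant _SEVERITY_GRID_POS (both A and B read the same dict)
def SEVERITY_GRID_POS : PySem.Dict String (Int × Int) :=
  PySem.Dict.ofList [("low", (2, 0)), ("medium", (1, 1)), ("high", (0, 2)), ("critical", (0, 2))]

-- ===== PORT A =====
-- one iteration of A's loop body; state = (used, result)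
def pvStepA (st : PySem.Dict (Int × Int) Int × List (String × String × String × Int × Int))
    (it : String × String × String) :
    PySem.Dict (Int × Int) Int × List (String × String × String × Int × Int) :=
  let used := st.1
  let result := st.2
  let base := SEVERITY_GRID_POS.getD it.2.1 (1, 1)
  let count := used.getD base 0
  let rc : Int × Int :=
    if count = 1 then
      let col := min (base.2 + 1) 2
      if (base.1, col) = (base.1, base.2) then (min (base.1 + 1) 2, col) else (base.1, col)
    else if count = 2 then (min (base.1 + 1) 2, base.2)
    else if count ≥ 3 then (max (base.1 - 1) 0, max (base.2 - 1) 0)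
    else (base.1, base.2)
  (used.insert base (count + 1), result ++ [(it.1, it.2.1, it.2.2, rc.1, rc.2)])

def assign_grid_positions_py (items : List (String × String × String)) :
    List (String × String × String × Int × Int) :=
  (items.foldl pvStepA (PySem.Dict.empty, [])).2

-- ===== PORT B =====
-- B's helper _place(base, count)
def placeB (base : Int × Int) (count : Int) : Int × Int :=
  if count = 1 then
    let col := min (base.2 + 1) 2
    if (base.1, col) = (base.1, base.2) then (min (base.1 + 1) 2, col) else (base.1, col)
  else if count = 2 then (min (base.1 + 1) 2, base.2)
  else if count ≥ 3 then (max (base.1 - 1) 0, max (base.2 - 1) 0)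
  else (base.1, base.2)

def assign_grid_positions_py_alt (items : List (String × String × String)) :
    List (String × String × String × Int × Int) :=
  let groups : PySem.Dict (Int × Int) (List Int) :=
    (PySem.List.enumerate items).foldl
      (fun g p => g.modify (SEVERITY_GRID_POS.getD p.2.2.1 (1, 1)) [] (· ++ [p.1]))
      PySem.Dict.empty
  let placement : PySem.Dict Int (Int × Int) :=
    groups.items.foldl
      (fun d q => (PySem.List.enumerate q.2).foldl
        (fun d r => d.insert r.2 (placeB q.1 r.1)) d)
      PySem.Dict.empty
  (PySem.List.enumerate items).map
    (fun p =>
      let rc := placement.getD p.1 (0, 0)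
      (p.2.1, p.2.2.1, p.2.2.2, rc.1, rc.2))

-- ===== PRECONDITION & SPEC =====
def Spec_assign_grid_positions_py (items : List (String × String × String)) (out : List (String × String × String × Int × Int)) : Prop := out = assign_grid_positions_py_alt items
instance (items : List (String × String × String)) (out : List (String × String × String × Int × Int)) : Decidable (Spec_assign_grid_positions_py items out) := by unfold Spec_assign_grid_positions_py; infer_instance

-- ===== CLAIM (what is proved, stated in full; the proofs are below) =====
def Claim_equal_assign_grid_positions_py : Prop := ∀ (items : List (String × String × String)), Dom_assign_grid_positions_py items → Spec_assign_grid_positions_py items (assign_grid_positions_py items)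

-- ===== LEMMAS AND PROOFS =====
def keyOf (it : String × String × String) : Int × Int := SEVERITY_GRID_POS.getD it.2.1 (1, 1)

def mkSpec : List (String × String × String) → ((Int × Int) → Int) →
    List (String × String × String × Int × Int)
  | [], _ => []
  | it :: rest, f =>
    (it.1, it.2.1, it.2.2, (placeB (keyOf it) (f (keyOf it))).1, (placeB (keyOf it) (f (keyOf it))).2)
      :: mkSpec rest (fun b => if b = keyOf it then f b + 1 else f b)

lemma length_mkSpec (items : List (String × String × String)) :
    ∀ f, (mkSpec items f).length = items.length := by
  induction items with
  | nil => intro f; rfl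
  | cons it rest ih => intro f; simp [mkSpec, ih]

set_option maxRecDepth 4000 in
lemma getElem?_mkSpec (items : List (String × String × String)) :
    ∀ (f : (Int × Int) → Int) (j : Nat) (hj : j < items.length),
      (mkSpec items f)[j]? =
        some ((items[j].1, items[j].2.1, items[j].2.2,
          (placeB (keyOf items[j]) (f (keyOf items[j]) + (((items.take j).map keyOf).count (keyOf items[j]) : Int))).1,
          (placeB (keyOf items[j]) (f (keyOf items[j]) + (((items.take j).map keyOf).count (keyOf items[j]) : Int))).2)) := by
  induction items with
  | nil => intro f j hj; simp at hj
  | cons it rest ih =>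
    intro f j hj
    cases j with
    | zero => simp [mkSpec]
    | succ j =>
      have hj' : j < rest.length := by simp only [List.length_cons] at hj; omega
      have step : (mkSpec (it :: rest) f)[j+1]? =
          (mkSpec rest (fun b => if b = keyOf it then f b + 1 else f b))[j]? := by
        rfl
      have hcount : (if keyOf rest[j] = keyOf it then f (keyOf rest[j]) + 1 else f (keyOf rest[j]))
            + (((rest.take j).map keyOf).count (keyOf rest[j]) : Int)
          = f (keyOf rest[j]) + ((keyOf it :: (rest.take j).map keyOf).count (keyOf rest[j]) : Int) := by
        rw [List.count_cons]
        by_cases h : keyOf rest[j] = keyOf it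
        · rw [if_pos h, if_pos (by exact beq_iff_eq.mpr h.symm)]
          push_cast; ring
        · rw [if_neg h, if_neg (by simpa using fun e => h e.symm)]
          push_cast; ring
      rw [step, ih _ j hj']
      simp only [List.getElem_cons_succ]
      simp only [List.take_succ_cons]
      simp only [List.map_cons]
      rw [hcount]

lemma foldA_eq (items : List (String × String × String)) :
    ∀ (used : PySem.Dict (Int × Int) Int) res,
      (items.foldl pvStepA (used, res)).2 = res ++ mkSpec items (fun b => used.getD b 0) := by
  induction items with
  | nil => intro used res; simp [mkSpec]
  | cons it rest ih =>
    intro used res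
    rw [List.foldl_cons, mkSpec]
    show (rest.foldl pvStepA (pvStepA (used, res) it)).2 = _
    rw [show pvStepA (used, res) it =
        (used.insert (keyOf it) (used.getD (keyOf it) 0 + 1),
         res ++ [(it.1, it.2.1, it.2.2,
            (placeB (keyOf it) (used.getD (keyOf it) 0)).1,
            (placeB (keyOf it) (used.getD (keyOf it) 0)).2)]) from rfl]
    rw [ih]
    rw [show (fun b => (used.insert (keyOf it) (used.getD (keyOf it) 0 + 1)).getD b 0)
        = (fun b => if b = keyOf it then used.getD b 0 + 1 else used.getD b 0) from by
      funext b; rw [PySem.Dict.getD_insert]; split_ifs with h <;> simp [h]]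
    simp

lemma A_eq_mkSpec (items : List (String × String × String)) :
    assign_grid_positions_py items = mkSpec items (fun _ => 0) := by
  unfold assign_grid_positions_py
  rw [foldA_eq]
  simp [PySem.Dict.getD_empty]

def groupsOf (items : List (String × String × String)) : PySem.Dict (Int × Int) (List Int) :=
  (PySem.List.enumerate items 0).foldl
    (fun g p => g.modify (SEVERITY_GRID_POS.getD p.2.2.1 (1, 1)) [] (· ++ [p.1]))
    PySem.Dict.empty

def placementOf (items : List (String × String × String)) : PySem.Dict Int (Int × Int) :=
  (groupsOf items).items.foldl
    (fun d q => (PySem.List.enumerate q.2 0).foldl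
      (fun d r => d.insert r.2 (placeB q.1 r.1)) d)
    PySem.Dict.empty

lemma alt_eq (items : List (String × String × String)) :
    assign_grid_positions_py_alt items =
      (PySem.List.enumerate items 0).map
        (fun p => (p.2.1, p.2.2.1, p.2.2.2,
          ((placementOf items).getD p.1 (0, 0)).1, ((placementOf items).getD p.1 (0, 0)).2)) := rfl

def idxsOf (items : List (String × String × String)) (b : Int × Int) : List Int :=
  ((PySem.List.enumerate items 0).filter (fun p => keyOf p.2 == b)).map (·.1)

lemma groups_getD (items : List (String × String × String)) (b : Int × Int) :
    (groupsOf items).getD b [] = idxsOf items b := by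
  have h1 : groupsOf items =
      ((PySem.List.enumerate items 0).map (fun p => (keyOf p.2, p.1))).foldl
        (fun d p => d.modify p.1 [] (fun x => x ++ [p.2])) PySem.Dict.empty := by
    rw [List.foldl_map]; rfl
  rw [h1, PySem.Dict.getD_foldl_modify_append]
  rw [List.filter_map]
  unfold idxsOf
  rw [List.map_map]
  simp only [PySem.Dict.getD_empty, List.nil_append, Function.comp_def]

lemma groups_keys_nodup (items : List (String × String × String)) :
    (groupsOf items).keys.Nodup := by
  have h := PySem.Dict.nodup_keys_foldl_modify_key (PySem.List.enumerate items 0)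
    (fun (p : Int × (String × String × String)) => SEVERITY_GRID_POS.getD p.2.2.1 (1, 1))
    ([] : List Int)
    (fun (_ : PySem.Dict (Int × Int) (List Int)) (p : Int × (String × String × String)) (v : List Int) => v ++ [p.1])
    PySem.Dict.empty PySem.Dict.nodup_keys_empty
  exact h

lemma groups_keys_eq (items : List (String × String × String)) :
    (groupsOf items).keys = PySem.Set.update ([] : List (Int × Int)) (items.map keyOf) := by
  have h := PySem.Dict.keys_foldl_modify_key (PySem.List.enumerate items 0)
    (fun (p : Int × (String × String × String)) => SEVERITY_GRID_POS.getD p.2.2.1 (1, 1))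
    ([] : List Int)
    (fun (_ : PySem.Dict (Int × Int) (List Int)) (p : Int × (String × String × String)) (v : List Int) => v ++ [p.1])
    PySem.Dict.empty
  have hmaps : (PySem.List.enumerate items 0).map
      (fun (p : Int × (String × String × String)) => SEVERITY_GRID_POS.getD p.2.2.1 (1, 1))
      = items.map keyOf := by
    have h2 : (PySem.List.enumerate items 0).map
        (fun (p : Int × (String × String × String)) => SEVERITY_GRID_POS.getD p.2.2.1 (1, 1))
        = ((PySem.List.enumerate items 0).map (fun p => p.2)).map keyOf := by
      rw [List.map_map]; rfl
    rw [h2, PySem.List.map_snd_enumerate]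
  rw [hmaps] at h
  exact h

lemma groups_keys_mem (items : List (String × String × String)) (b : Int × Int) :
    b ∈ (groupsOf items).keys ↔ b ∈ items.map keyOf := by
  rw [groups_keys_eq, PySem.Set.mem_update]
  simp

lemma items_groups (items : List (String × String × String)) :
    (groupsOf items).items = (groupsOf items).keys.map (fun b => (b, idxsOf items b)) := by
  rw [PySem.Dict.items_eq_map_keys (groupsOf items) (groups_keys_nodup items) []]
  exact List.map_congr_left (fun b _ => by rw [groups_getD])

def pairsOf (items : List (String × String × String)) : List (Int × (Int × Int)) :=
  (groupsOf items).items.flatMap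
    (fun q => (PySem.List.enumerate q.2 0).map (fun r => (r.2, placeB q.1 r.1)))

lemma placement_eq (items : List (String × String × String)) :
    placementOf items =
      (pairsOf items).foldl (fun d pr => d.insert pr.1 pr.2) PySem.Dict.empty := by
  unfold placementOf pairsOf
  rw [List.foldl_flatMap]
  exact (List.foldl_ext _ _ PySem.Dict.empty (fun d q _ => by rw [List.foldl_map])).symm

lemma fst_pairs (items : List (String × String × String)) :
    (pairsOf items).map (·.1) = (groupsOf items).keys.flatMap (idxsOf items) := by
  unfold pairsOf
  rw [List.map_flatMap, items_groups, List.flatMap_map]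
  apply List.flatMap_congr
  intro b _
  rw [List.map_map]
  have : ((fun (x : Int × (Int × Int)) => x.1) ∘ fun r => (r.2, placeB b r.1)) = (fun (r : Int × Int) => r.2) := rfl
  rw [this, PySem.List.map_snd_enumerate]

lemma mem_idxs (items : List (String × String × String)) (b : Int × Int) (i : Int) :
    i ∈ idxsOf items b ↔ ∃ k, ∃ _ : k < items.length, i = (k : Int) ∧ keyOf items[k] = b := by
  unfold idxsOf
  simp only [List.mem_map, List.mem_filter, PySem.List.mem_enumerate_iff]
  constructor
  · rintro ⟨p, ⟨⟨k, hk, rfl⟩, hpb⟩, rfl⟩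
    exact ⟨k, hk, by simp, by simpa using hpb⟩
  · rintro ⟨k, hk, rfl, hkb⟩
    exact ⟨((k : Int), items[k]), ⟨⟨k, hk, by simp⟩, by simpa using hkb⟩, rfl⟩

lemma nodup_idxs (items : List (String × String × String)) (b : Int × Int) :
    (idxsOf items b).Nodup := by
  unfold idxsOf
  have h := (PySem.List.pairwise_lt_enumerate items 0).filter (fun p => keyOf p.2 == b)
  have h2 : (((PySem.List.enumerate items 0).filter (fun p => keyOf p.2 == b)).map
      (fun x : Int × (String × String × String) => x.1)).Pairwise (· < ·) := by
    rw [List.pairwise_map]; exact h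
  exact h2.imp (fun hlt => ne_of_lt hlt)

lemma disjoint_idxs (items : List (String × String × String)) (b b' : Int × Int) (hne : b ≠ b') :
    List.Disjoint (idxsOf items b) (idxsOf items b') := by
  intro i hi hi'
  rw [mem_idxs] at hi hi'
  obtain ⟨k, hk, rfl, hb⟩ := hi
  obtain ⟨k', hk', he, hb'⟩ := hi'
  have : k = k' := by exact_mod_cast he
  subst this
  exact hne (hb ▸ hb')

lemma nodup_fst_pairs (items : List (String × String × String)) :
    ((pairsOf items).map (·.1)).Nodup := by
  rw [fst_pairs, List.nodup_flatMap]
  refine ⟨fun b _ => nodup_idxs items b, ?_⟩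
  exact (groups_keys_nodup items).imp (fun hne => disjoint_idxs items _ _ hne)

lemma len_filter_enum {α : Type} (xs : List α) :
    ∀ (s : Int) (q : α → Bool),
      (((PySem.List.enumerate xs s).filter (fun p => q p.2)).length) = xs.countP q := by
  induction xs with
  | nil => intro s q; simp [PySem.List.enumerate_nil]
  | cons x xs ih =>
    intro s q
    rw [PySem.List.enumerate_cons, List.countP_cons]
    by_cases h : q x
    · simp [h, ih]
    · simp [h, ih]

lemma pos_mem (items : List (String × String × String)) :
    ∀ (j : Nat) (hj : j < items.length),
      (((((items.take j).map keyOf).count (keyOf items[j])) : Int), (j : Int)) ∈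
        PySem.List.enumerate (idxsOf items (keyOf items[j])) 0 := by
  induction items using List.reverseRecOn with
  | nil => intro j hj; simp at hj
  | append_singleton ys x ih =>
    intro j hj
    rw [List.length_append, List.length_singleton] at hj
    have hidx : ∀ b, idxsOf (ys ++ [x]) b =
        idxsOf ys b ++ (if keyOf x == b then [(0 + (ys.length : Int) + 0)] else []) := by
      intro b
      unfold idxsOf
      rw [PySem.List.enumerate_append, List.filter_append, List.map_append]
      congr 1
      rw [PySem.List.enumerate_cons, PySem.List.enumerate_nil, List.filter_cons]
      by_cases h : keyOf x == b <;> simp [h]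
    by_cases hlt : j < ys.length
    · have hget : (ys ++ [x])[j]'(by simp; omega) = ys[j]'hlt := by
        exact List.getElem_append_left ..
      have htake : (ys ++ [x]).take j = ys.take j := List.take_append_of_le_length (le_of_lt hlt)
      rw [hget, htake, hidx, PySem.List.enumerate_append]
      exact List.mem_append_left _ (ih j hlt)
    · have hj' : j = ys.length := by omega
      subst hj'
      have hget : (ys ++ [x])[ys.length]'(by simp) = x := by
        simp
      have htake : (ys ++ [x]).take ys.length = ys := List.take_left
      rw [hget, htake, hidx, if_pos (by simp)]
      rw [PySem.List.enumerate_append]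
      apply List.mem_append_right
      have hlen : (idxsOf ys (keyOf x)).length = (ys.map keyOf).count (keyOf x) := by
        unfold idxsOf
        rw [List.length_map, List.count_eq_countP, List.countP_map]
        exact len_filter_enum ys 0 (fun y => keyOf y == keyOf x)
      rw [PySem.List.enumerate_cons, PySem.List.enumerate_nil]
      simp [hlen]

lemma placement_items (items : List (String × String × String)) :
    (placementOf items).items = pairsOf items := by
  rw [placement_eq]
  have h := PySem.Dict.items_foldl_insert_fresh (pairsOf items)
    (fun a => a.1) (fun a => a.2) PySem.Dict.empty
    (fun a _ => PySem.Dict.contains_empty _) (nodup_fst_pairs items)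
  simpa using h

lemma placement_keys_nodup (items : List (String × String × String)) :
    (placementOf items).keys.Nodup := by
  have hk : (placementOf items).keys = (placementOf items).items.map (·.1) := by
    simp only [PySem.Dict.keys]
  rw [hk, placement_items]
  exact nodup_fst_pairs items

lemma placement_getD (items : List (String × String × String)) (j : Nat) (hj : j < items.length) :
    (placementOf items).getD ((j : Nat) : Int) (0, 0) =
      placeB (keyOf items[j]) ((((items.take j).map keyOf).count (keyOf items[j])) : Int) := by
  apply PySem.Dict.getD_of_mem_items
  · rw [placement_items]
    unfold pairsOf
    rw [List.mem_flatMap]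
    refine ⟨(keyOf items[j], idxsOf items (keyOf items[j])), ?_, ?_⟩
    · rw [items_groups]
      exact List.mem_map.mpr ⟨keyOf items[j],
        (groups_keys_mem items _).mpr (List.mem_map.mpr ⟨items[j], List.getElem_mem hj, rfl⟩), rfl⟩
    · exact List.mem_map.mpr ⟨(((((items.take j).map keyOf).count (keyOf items[j])) : Int), (j : Int)),
        pos_mem items j hj, rfl⟩
  · exact placement_keys_nodup items

lemma B_eq_mkSpec (items : List (String × String × String)) :
    assign_grid_positions_py_alt items = mkSpec items (fun _ => 0) := by
  rw [alt_eq]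
  apply List.ext_getElem?
  intro j
  by_cases hj : j < items.length
  · rw [List.getElem?_map, PySem.List.getElem?_enumerate, List.getElem?_eq_getElem hj,
      getElem?_mkSpec items _ j hj]
    simp only [Option.map_some, zero_add, placement_getD items j hj]
  · have h1 : items[j]? = none := by rw [List.getElem?_eq_none_iff]; omega
    rw [List.getElem?_map, PySem.List.getElem?_enumerate, h1]
    have h2 : (mkSpec items (fun _ => 0))[j]? = none := by
      rw [List.getElem?_eq_none_iff, length_mkSpec]; omega
    rw [h2]; rfl

-- ===== VERDICT (by name: the statement is the Claim_ definition above) =====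
theorem assign_grid_positions_py_spec : Claim_equal_assign_grid_positions_py := by
  intro items _
  unfold Spec_assign_grid_positions_py
  rw [A_eq_mkSpec, B_eq_mkSpec]
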